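-- pv_equiv track=rewrite | github.com/Daniel-Sottovia/Coursera | Introdução_Parte_2/Semana2/extra02.py | primeiro_lex
-- ===== SOURCE A (Python) =====
-- def primeiro_lex(lista):
--     tam = len(lista)
--     cont = 0
--     valor_menor = 0
--     palavra = ''
--     while cont < tam:
--         if cont == 0:
--             valor_menor = ord(lista[cont][0])
--             palavra = lista[cont]
--         elif valor_menor > ord(lista[cont][0]):
--             valor_menor = ord(lista[cont][0])
--             palavra = lista[cont]
--         cont += 1
--     return palavra
-- ===== SOURCE B (Python) =====
-- def primeiro_lex(lista):
--     if not lista: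
--         return ''
--     ordenada = sorted(lista, key=lambda w: ord(w[0]))
--     return ordenada[0]
-- ===== Notes on version B (the rewrite author's own statement) =====
-- stated objective: alternative
-- what changed: Replaces the index-driven running-minimum while loop with a stable sort by first-character ordinal followed by taking the front element (plus an explicit empty-list guard).
import Mathlib
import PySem

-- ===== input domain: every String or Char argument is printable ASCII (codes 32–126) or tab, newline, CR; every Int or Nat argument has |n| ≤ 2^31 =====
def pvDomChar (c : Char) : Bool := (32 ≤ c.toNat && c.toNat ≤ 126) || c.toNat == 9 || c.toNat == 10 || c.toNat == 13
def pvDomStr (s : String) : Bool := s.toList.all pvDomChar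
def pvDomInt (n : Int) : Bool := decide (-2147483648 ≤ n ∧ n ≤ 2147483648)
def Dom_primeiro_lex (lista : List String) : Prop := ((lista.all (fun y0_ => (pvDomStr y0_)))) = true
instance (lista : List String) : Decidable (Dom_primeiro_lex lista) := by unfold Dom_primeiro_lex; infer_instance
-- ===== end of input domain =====

-- B replaces A's index-driven running-minimum loop with a stable sort by first-character
-- ordinal plus taking the front element (alternative decomposition, no speed claim).

-- ord(w[0]) : none = IndexError on the empty word (excluded by Pre_); 0 is an arbitrary total default
def ordFirst (w : String) : Int :=
  match PySem.Str.pyGet? w 0 with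
  | some c => (c.toNat : Int)
  | none => 0

-- ===== PORT A =====
def primeiro_lex (lista : List String) : String :=
  let tam : Int := PySem.List.len lista
  let st :=
    (PySem.List.pyRange 0 tam 1).foldl
      (fun (st : Int × String) cont =>
        if cont == 0 then
          (ordFirst (PySem.List.pyGetD lista cont ""), PySem.List.pyGetD lista cont "")
        else if st.1 > ordFirst (PySem.List.pyGetD lista cont "") then
          (ordFirst (PySem.List.pyGetD lista cont ""), PySem.List.pyGetD lista cont "")
        else st)
      ((0 : Int), "")
  st.2

-- ===== PORT B =====
def primeiro_lex_alt (lista : List String) : String :=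
  match lista with
  | [] => ""
  | _ :: _ =>
    let ordenada := PySem.List.sorted lista (fun w => ordFirst w) false
    PySem.List.pyGetD ordenada 0 ""

-- ===== PRECONDITION & SPEC =====
-- Pre_ excludes exactly the inputs where Python A raises IndexError: a list containing the empty word.
def Pre_primeiro_lex (lista : List String) : Prop := ∀ w ∈ lista, w ≠ ""
instance (lista : List String) : Decidable (Pre_primeiro_lex lista) := by
  unfold Pre_primeiro_lex; infer_instance
def pvWitness_primeiro_lex : List String := ["casa", "Bola", "abc"]

def Spec_primeiro_lex (lista : List String) (out : String) : Prop := out = primeiro_lex_alt lista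
instance (lista : List String) (out : String) : Decidable (Spec_primeiro_lex lista out) := by
  unfold Spec_primeiro_lex; infer_instance

-- ===== CLAIM (what is proved, stated in full; the proofs are below) =====
def Claim_equal_primeiro_lex : Prop := ∀ (lista : List String), Dom_primeiro_lex lista → Pre_primeiro_lex lista → Spec_primeiro_lex lista (primeiro_lex lista)

-- ===== LEMMAS AND PROOFS =====

-- the common value: leftmost element of p :: t with minimal ordFirst
def pickMin (p : String) (t : List String) : String :=
  t.foldl (fun p w => if ordFirst w < ordFirst p then w else p) p

lemma foldA_eq_pickMin (t : List String) (p : String) :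
    t.foldl (fun (st : Int × String) w =>
        if st.1 > ordFirst w then (ordFirst w, w) else st) (ordFirst p, p)
      = (ordFirst (pickMin p t), pickMin p t) := by
  induction t generalizing p with
  | nil => simp [pickMin]
  | cons w t ih =>
    simp only [List.foldl_cons, pickMin]
    by_cases h : ordFirst w < ordFirst p
    · rw [if_pos (by exact h), if_pos h]; exact ih w
    · rw [if_neg (by omega), if_neg h]; exact ih p

lemma foldl_insertBy_head (t : List String) (p : String) (rest : List String) :
    ∃ rest', t.foldl
        (fun acc x => PySem.List.insertBy
          (fun a b => decide (ordFirst a < ordFirst b)) x acc) (p :: rest)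
      = pickMin p t :: rest' := by
  induction t generalizing p rest with
  | nil => exact ⟨rest, by simp [pickMin]⟩
  | cons w t ih =>
    simp only [List.foldl_cons, PySem.List.insertBy, pickMin]
    by_cases h : ordFirst w < ordFirst p
    · rw [if_pos (by simpa using h)]
      simpa [pickMin, h] using ih w (p :: rest)
    · rw [if_neg (by simpa using h)]
      simpa [pickMin, h] using ih p (PySem.List.insertBy (fun a b => decide (ordFirst a < ordFirst b)) w rest)

lemma head_sorted_eq_pickMin (h : String) (t : List String) :
    PySem.List.pyGetD (PySem.List.sorted (h :: t) (fun w => ordFirst w) false) 0 ""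
      = pickMin h t := by
  rw [PySem.List.sorted_eq_foldl_insertBy]
  simp only [List.foldl_cons, PySem.List.insertBy]
  obtain ⟨rest', hr⟩ := foldl_insertBy_head t h []
  rw [hr]
  simp [PySem.List.pyGetD, PySem.List.pyGet?, PySem.List.pyIdx?]

-- ===== VERDICT (by name: the statement is the Claim_ definition above) =====
theorem primeiro_lex_spec : Claim_equal_primeiro_lex := by
  intro lista _ _
  unfold Spec_primeiro_lex primeiro_lex primeiro_lex_alt
  cases lista with
  | nil => simp [PySem.List.pyRange_one_eq_nil]
  | cons h t =>
    rw [head_sorted_eq_pickMin]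
    dsimp only
    have hlen : (0:Int) < PySem.List.len (h :: t) := by
      simp [PySem.List.len_eq]
    rw [PySem.List.pyRange_one_cons hlen]
    simp only [List.foldl_cons, beq_self_eq_true, if_pos, zero_add]
    have hget0 : PySem.List.pyGetD (h :: t) 0 "" = h := by
      simp [PySem.List.pyGetD, PySem.List.pyGet?, PySem.List.pyIdx?]
    rw [hget0]
    have hcong : (PySem.List.pyRange 1 (PySem.List.len (h :: t)) 1).foldl
        (fun (st : Int × String) cont =>
          if cont == 0 then
            (ordFirst (PySem.List.pyGetD (h :: t) cont ""), PySem.List.pyGetD (h :: t) cont "")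
          else if st.1 > ordFirst (PySem.List.pyGetD (h :: t) cont "") then
            (ordFirst (PySem.List.pyGetD (h :: t) cont ""), PySem.List.pyGetD (h :: t) cont "")
          else st) (ordFirst h, h)
      = (PySem.List.pyRange 1 (PySem.List.len (h :: t)) 1).foldl
        (fun (st : Int × String) cont =>
          if st.1 > ordFirst (PySem.List.pyGetD (h :: t) cont "") then
            (ordFirst (PySem.List.pyGetD (h :: t) cont ""), PySem.List.pyGetD (h :: t) cont "")
          else st) (ordFirst h, h) := by
      apply PySem.List.foldl_congr_mem
      intro a x hx
      have : (1:Int) ≤ x := by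
        have := (PySem.List.mem_pyRange_one).mp hx
        omega
      have hne : (x == (0:Int)) = false := by simp; omega
      rw [hne]; simp
    rw [hcong]
    rw [PySem.List.foldl_pyRange_pyGetD (h :: t) ""
        (fun (st : Int × String) w => if st.1 > ordFirst w then (ordFirst w, w) else st)
        (ordFirst h, h) (by norm_num : (0:Int) ≤ 1)]
    simpa using congrArg Prod.snd (foldA_eq_pickMin t h)
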